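-- pv_equiv track=rewrite | github.com/jihlenburg/brandkit | brandkit/generators/phonemes/__init__.py | get_syllable_weight
-- ===== SOURCE A (Python) =====
-- def get_syllable_weight(syllable: str) -> str:
--     """
--     Determine if a syllable is Heavy (H) or Light (L).
--
--     Heavy: closed syllable (ends in consonant) or has long vowel/diphthong
--     Light: open syllable with short vowel (CV pattern)
--     """
--     vowels = set('aeiou')
--     consonants = set('bcdfghjklmnpqrstvwxyz')
--
--     if not syllable:
--         return 'L'
--
--     # Check if syllable ends in consonant (closed = heavy)
--     if syllable[-1] in consonants:
--         return 'H'
--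
--     # Check for diphthongs (heavy)
--     diphthongs = ['ai', 'au', 'ei', 'eu', 'oi', 'ou', 'ae', 'oe']
--     for diph in diphthongs:
--         if diph in syllable:
--             return 'H'
--
--     # Open syllable with single short vowel = light
--     return 'L'
-- ===== SOURCE B (Python) =====
-- def get_syllable_weight(syllable: str) -> str:
--     """H/L syllable weight: single pass over adjacent character pairs with a
--     character-class rule instead of eight substring searches."""
--     if not syllable:
--         return 'L'
--     if syllable[-1] in set('bcdfghjklmnpqrstvwxyz'):
--         return 'H'
--     for prev, cur in zip(syllable, syllable[1:]):
--         if prev in 'aeo' and (cur in 'iu' or (cur == 'e' and prev != 'e')):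
--             return 'H'
--     return 'L'
-- ===== Notes on version B (the rewrite author's own statement) =====
-- stated objective: alternative
-- what changed: Replaces the scan over eight diphthong patterns with eight substring searches by a single left-to-right pass over adjacent character pairs judged by a closed character-class rule (first in aeo, second in iu, or second e with first a/o).
import Mathlib
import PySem

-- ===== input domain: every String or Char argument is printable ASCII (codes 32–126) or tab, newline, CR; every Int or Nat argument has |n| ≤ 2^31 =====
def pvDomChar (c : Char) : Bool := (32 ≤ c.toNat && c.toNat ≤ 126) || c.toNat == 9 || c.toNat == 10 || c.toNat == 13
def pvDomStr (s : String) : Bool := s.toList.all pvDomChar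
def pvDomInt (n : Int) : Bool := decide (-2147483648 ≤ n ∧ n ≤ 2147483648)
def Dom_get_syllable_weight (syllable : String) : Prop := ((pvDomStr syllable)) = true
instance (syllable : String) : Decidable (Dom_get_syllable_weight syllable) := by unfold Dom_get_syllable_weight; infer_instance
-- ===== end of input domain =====

-- B replaces A's eight substring searches over a diphthong list by one pass over
-- adjacent character pairs with a closed character-class rule (alternative, same cost).


-- ===== PORT A =====
def get_syllable_weight (syllable : String) : String :=
  let consonants := PySem.Set.ofList "bcdfghjklmnpqrstvwxyz".toList
  match syllable.toList with
  | [] => "L"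
  | x :: xs =>
    if consonants.contains (xs.getLastD x) then "H"
    else if (["ai", "au", "ei", "eu", "oi", "ou", "ae", "oe"]).any
        (fun d => PySem.Str.isIn d syllable) then "H"
    else "L"

-- ===== PORT B =====
-- prev in 'aeo' and (cur in 'iu' or (cur == 'e' and prev != 'e'))
def pvDiphPair (p c : Char) : Bool :=
  (p == 'a' || p == 'e' || p == 'o') && ((c == 'i' || c == 'u') || (c == 'e' && p != 'e'))

def get_syllable_weight_alt (syllable : String) : String :=
  let consonants := PySem.Set.ofList "bcdfghjklmnpqrstvwxyz".toList
  match syllable.toList with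
  | [] => "L"
  | x :: xs =>
    if consonants.contains (xs.getLastD x) then "H"
    else if ((x :: xs).zip xs).any (fun pc => pvDiphPair pc.1 pc.2) then "H"
    else "L"

-- ===== PRECONDITION & SPEC =====
def Spec_get_syllable_weight (syllable : String) (out : String) : Prop := out = get_syllable_weight_alt syllable
instance (syllable : String) (out : String) : Decidable (Spec_get_syllable_weight syllable out) := by unfold Spec_get_syllable_weight; infer_instance

-- ===== CLAIM (what is proved, stated in full; the proofs are below) =====
def Claim_equal_get_syllable_weight : Prop := ∀ (syllable : String), Dom_get_syllable_weight syllable → Spec_get_syllable_weight syllable (get_syllable_weight syllable)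

-- ===== LEMMAS AND PROOFS =====

-- an adjacent pair of l is exactly a length-2 infix of l
theorem pair_mem_zip_tail_iff_infix (l : List Char) (a b : Char) :
    (a, b) ∈ l.zip l.tail ↔ [a, b] <:+: l := by
  induction l with
  | nil => simp
  | cons x xs ih =>
    cases xs with
    | nil =>
      simp only [List.tail, List.zip_nil_right, List.not_mem_nil, false_iff]
      intro h
      have := h.length_le
      simp at this
    | cons y ys =>
      constructor
      · intro h
        rcases List.mem_cons.mp h with h | h
        · obtain ⟨h1, h2⟩ := Prod.mk.injEq .. ▸ h
          exact ⟨[], ys, by simp [Prod.ext_iff] at h; simp [h.1, h.2]⟩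
        · exact ((ih.mp h).trans (List.suffix_cons x (y :: ys)).isInfix)
      · intro h
        rcases (List.infix_cons_iff).mp h with h | h
        · rcases h with ⟨t, ht⟩
          simp at ht
          simp [ht.1, ht.2.1]
        · exact List.mem_cons_of_mem _ (ih.mpr h)

theorem diph_any_eq_zip_any (s : String) (l : List Char) (hs : s.toList = l) :
    ((["ai", "au", "ei", "eu", "oi", "ou", "ae", "oe"]).any
        (fun d => PySem.Str.isIn d s))
      = ((l.zip l.tail).any (fun pc => pvDiphPair pc.1 pc.2)) := by
  rw [Bool.eq_iff_iff]
  simp only [List.any_eq_true, PySem.Str.isIn_iff_infix, hs]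
  constructor
  · rintro ⟨d, hd, hinf⟩
    fin_cases hd <;>
      exact ⟨_, (pair_mem_zip_tail_iff_infix l _ _).mpr hinf, by decide⟩
  · rintro ⟨⟨a, b⟩, hmem, hp⟩
    have hinf := (pair_mem_zip_tail_iff_infix l a b).mp hmem
    simp only [pvDiphPair, Bool.and_eq_true, Bool.or_eq_true, beq_iff_eq, bne_iff_ne] at hp
    obtain ⟨hp1, hp2⟩ := hp
    rcases hp1 with (rfl | rfl) | rfl <;>
      rcases hp2 with (rfl | rfl) | ⟨rfl, hne⟩ <;>
      first
      | exact ⟨"ai", by simp, hinf⟩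
      | exact ⟨"au", by simp, hinf⟩
      | exact ⟨"ei", by simp, hinf⟩
      | exact ⟨"eu", by simp, hinf⟩
      | exact ⟨"oi", by simp, hinf⟩
      | exact ⟨"ou", by simp, hinf⟩
      | exact ⟨"ae", by simp, hinf⟩
      | exact ⟨"oe", by simp, hinf⟩
      | exact absurd rfl hne

-- ===== VERDICT (by name: the statement is the Claim_ definition above) =====
theorem get_syllable_weight_spec : Claim_equal_get_syllable_weight := by
  intro s _
  unfold Spec_get_syllable_weight get_syllable_weight get_syllable_weight_alt
  cases h : s.toList with
  | nil => rfl
  | cons x xs =>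
    simp only
    rw [diph_any_eq_zip_any s (x :: xs) h]
    simp
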